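-- pv_equiv track=rewrite | github.com/YellowRichStrong/All | enhance_tool_content.py | get_tool_category
-- ===== SOURCE A (Python) =====
-- def get_tool_category(filename):
--     """Determine tool category based on filename"""
--     if 'image-' in filename:
--         return 'Image'
--     elif any(enc in filename for enc in ['aes-', 'md5-', 'sha-', 'hmac-', 'encryption', 'jwt-', 'des-', 'base64-', 'ascii-']):
--         return 'Encryption'
--     elif any(code in filename for code in ['css-', 'html-', 'js-', 'json-', 'sql-', 'xml-', 'minify', 'format']):
--         return 'Code'
--     elif any(net in filename for net in ['ip-', 'dns-', 'ping-', 'port-', 'traceroute', 'whois-', 'website-']):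
--         return 'Network'
--     else:
--         return 'General'
-- ===== SOURCE B (Python) =====
-- # B: instead of an ordered early-return chain of group checks, scan a flat
-- # keyword->priority map once, keep the MINIMUM priority among matching
-- # keywords, and index into the category table at the end.
-- KEYWORD_PRIORITY = {
--     'image-': 0,
--     'aes-': 1, 'md5-': 1, 'sha-': 1, 'hmac-': 1, 'encryption': 1,
--     'jwt-': 1, 'des-': 1, 'base64-': 1, 'ascii-': 1,
--     'css-': 2, 'html-': 2, 'js-': 2, 'json-': 2, 'sql-': 2,
--     'xml-': 2, 'minify': 2, 'format': 2,
--     'ip-': 3, 'dns-': 3, 'ping-': 3, 'port-': 3, 'traceroute': 3,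
--     'whois-': 3, 'website-': 3,
-- }
-- CATEGORIES = ['Image', 'Encryption', 'Code', 'Network', 'General']
--
-- def get_tool_category(filename):
--     """Determine tool category based on filename"""
--     best = len(CATEGORIES) - 1
--     for kw, pri in KEYWORD_PRIORITY.items():
--         if pri < best and kw in filename:
--             best = pri
--     return CATEGORIES[best]
-- ===== Notes on version B (the rewrite author's own statement) =====
-- stated objective: alternative
-- what changed: Replaces the ordered if/elif chain of per-category any() checks (first match wins, early return) with a single accumulator pass over a flat keyword-to-priority map that keeps the minimum matching priority and indexes a category table at the end.
import Mathlib
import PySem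

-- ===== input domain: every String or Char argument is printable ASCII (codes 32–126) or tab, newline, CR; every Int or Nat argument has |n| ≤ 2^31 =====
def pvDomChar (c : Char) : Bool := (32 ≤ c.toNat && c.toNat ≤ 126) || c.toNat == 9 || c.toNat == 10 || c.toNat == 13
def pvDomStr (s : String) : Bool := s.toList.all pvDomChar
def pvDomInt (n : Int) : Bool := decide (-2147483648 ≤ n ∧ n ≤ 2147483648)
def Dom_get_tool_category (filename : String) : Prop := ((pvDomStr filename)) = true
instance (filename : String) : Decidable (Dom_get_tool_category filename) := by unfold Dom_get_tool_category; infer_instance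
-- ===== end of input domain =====

-- ===== PORT A =====
-- B replaces A's ordered early-return chain with one min-priority accumulator pass
-- over a flat keyword->priority map, then a table lookup; no speed claim.
def get_tool_category (filename : String) : String :=
  if PySem.Str.isIn "image-" filename then "Image"
  else if (["aes-", "md5-", "sha-", "hmac-", "encryption", "jwt-", "des-", "base64-", "ascii-"].any
      (fun enc => PySem.Str.isIn enc filename)) then "Encryption"
  else if (["css-", "html-", "js-", "json-", "sql-", "xml-", "minify", "format"].any
      (fun code => PySem.Str.isIn code filename)) then "Code"
  else if (["ip-", "dns-", "ping-", "port-", "traceroute", "whois-", "website-"].any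
      (fun net => PySem.Str.isIn net filename)) then "Network"
  else "General"

-- ===== PORT B =====
-- flat keyword -> priority map, in Source B's insertion order
def pvKwPriority : List (String × Nat) :=
  [("image-", 0),
   ("aes-", 1), ("md5-", 1), ("sha-", 1), ("hmac-", 1), ("encryption", 1),
   ("jwt-", 1), ("des-", 1), ("base64-", 1), ("ascii-", 1),
   ("css-", 2), ("html-", 2), ("js-", 2), ("json-", 2), ("sql-", 2),
   ("xml-", 2), ("minify", 2), ("format", 2),
   ("ip-", 3), ("dns-", 3), ("ping-", 3), ("port-", 3), ("traceroute", 3),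
   ("whois-", 3), ("website-", 3)]

def pvCategories : List String := ["Image", "Encryption", "Code", "Network", "General"]

def get_tool_category_alt (filename : String) : String :=
  pvCategories.getD
    (pvKwPriority.foldl
      (fun best kp => if decide (kp.2 < best) && PySem.Str.isIn kp.1 filename then kp.2 else best)
      (pvCategories.length - 1))
    "General"

-- ===== PRECONDITION & SPEC =====
def Spec_get_tool_category (filename : String) (out : String) : Prop := out = get_tool_category_alt filename
instance (filename : String) (out : String) : Decidable (Spec_get_tool_category filename out) := by unfold Spec_get_tool_category; infer_instance

-- ===== CLAIM (what is proved, stated in full; the proofs are below) =====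
def Claim_equal_get_tool_category : Prop := ∀ (filename : String), Dom_get_tool_category filename → Spec_get_tool_category filename (get_tool_category filename)

-- ===== LEMMAS AND PROOFS =====

-- folding B's min-priority step over a constant-priority keyword group from
-- accumulator `best` yields `p` iff `p < best` and some keyword matches (`f`)
theorem pvFold_group (f : String → Bool) (p best : Nat) (kws : List String) :
    List.foldl
      (fun best kp => if decide (kp.2 < best) && f kp.1 then kp.2 else best)
      best (kws.map (fun k => (k, p)))
    = if p < best ∧ kws.any f = true then p else best := by
  induction kws generalizing best with
  | nil => simp
  | cons k rest ih =>
    simp only [List.map_cons, List.foldl_cons, List.any_cons, ih]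
    by_cases hp : p < best <;> by_cases hk : f k = true <;>
      simp [hp, hk]

theorem get_tool_category_spec : Claim_equal_get_tool_category := by
  intro filename _
  unfold Spec_get_tool_category get_tool_category get_tool_category_alt
  have hKw : pvKwPriority
      = (["image-"].map (fun k => (k, 0)))
        ++ (["aes-", "md5-", "sha-", "hmac-", "encryption", "jwt-", "des-", "base64-", "ascii-"].map (fun k => (k, 1)))
        ++ (["css-", "html-", "js-", "json-", "sql-", "xml-", "minify", "format"].map (fun k => (k, 2)))
        ++ (["ip-", "dns-", "ping-", "port-", "traceroute", "whois-", "website-"].map (fun k => (k, 3))) := rfl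
  rw [hKw, List.foldl_append, List.foldl_append, List.foldl_append,
      pvFold_group (fun s => PySem.Str.isIn s filename),
      pvFold_group (fun s => PySem.Str.isIn s filename),
      pvFold_group (fun s => PySem.Str.isIn s filename),
      pvFold_group (fun s => PySem.Str.isIn s filename)]
  simp only [List.any_cons, List.any_nil, Bool.or_false]
  generalize PySem.Str.isIn "image-" filename = b0
  generalize (PySem.Str.isIn "aes-" filename || (PySem.Str.isIn "md5-" filename ||
      (PySem.Str.isIn "sha-" filename || (PySem.Str.isIn "hmac-" filename ||
      (PySem.Str.isIn "encryption" filename || (PySem.Str.isIn "jwt-" filename ||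
      (PySem.Str.isIn "des-" filename || (PySem.Str.isIn "base64-" filename ||
      PySem.Str.isIn "ascii-" filename)))))))) = b1
  generalize (PySem.Str.isIn "css-" filename || (PySem.Str.isIn "html-" filename ||
      (PySem.Str.isIn "js-" filename || (PySem.Str.isIn "json-" filename ||
      (PySem.Str.isIn "sql-" filename || (PySem.Str.isIn "xml-" filename ||
      (PySem.Str.isIn "minify" filename || PySem.Str.isIn "format" filename))))))) = b2
  generalize (PySem.Str.isIn "ip-" filename || (PySem.Str.isIn "dns-" filename ||
      (PySem.Str.isIn "ping-" filename || (PySem.Str.isIn "port-" filename ||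
      (PySem.Str.isIn "traceroute" filename || (PySem.Str.isIn "whois-" filename ||
      PySem.Str.isIn "website-" filename)))))) = b3
  cases b0 <;> cases b1 <;> cases b2 <;> cases b3 <;> rfl
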